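-- pv_equiv track=rewrite | github.com/SnippyCodes/Libratio | colab_qlora_grpo_fleet.py | extract_meta_from_prompt
-- ===== SOURCE A (Python) =====
-- def extract_meta_from_prompt(prompt, fallback_task_id="fleet_precision"):
--     """Extract metadata from prompt text."""
--     text = str(prompt)
--     task_id = fallback_task_id
--     scenario_id = None
--
--     for line in text.splitlines():
--         line = line.strip()
--         if not line.startswith("[META]"):
--             continue
--         payload = line[len("[META]"):].strip()
--         for chunk in payload.split(";"):
--             if "=" not in chunk:
--                 continue
--             key, val = chunk.split("=", 1)
--             key = key.strip()
--             val = val.strip()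
--             if key == "task_id" and val:
--                 task_id = val
--             elif key == "scenario_id" and val:
--                 scenario_id = val
--         break
--
--     return {"task_id": task_id, "scenario_id": scenario_id}
-- ===== SOURCE B (Python) =====
-- def extract_meta_from_prompt(prompt, fallback_task_id="fleet_precision"):
--     """Extract metadata from prompt text."""
--     text = str(prompt)
--     payload = None
--     for ln in text.splitlines():
--         if ln.strip().startswith("[META]"):
--             payload = ln.strip()[len("[META]"):].strip()
--             break
--     chunks = payload.split(";") if payload is not None else []
--
--     def last_value(key):
--         # last assignment wins = first non-empty match scanning back-to-front
--         for chunk in reversed(chunks):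
--             if "=" in chunk:
--                 k, v = chunk.split("=", 1)
--                 if k.strip() == key:
--                     v = v.strip()
--                     if v:
--                         return v
--         return None
--
--     tid = last_value("task_id")
--     return {"task_id": tid if tid is not None else fallback_task_id,
--             "scenario_id": last_value("scenario_id")}
-- ===== Notes on version B (the rewrite author's own statement) =====
-- stated objective: alternative
-- what changed: Replaces A's single forward fold over mutable (task_id, scenario_id) state by a break-on-first-META payload search plus, per key, a back-to-front scan of the chunks returning the first non-empty match (last assignment wins), so no running state is threaded through the chunk loop.
import Mathlib
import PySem

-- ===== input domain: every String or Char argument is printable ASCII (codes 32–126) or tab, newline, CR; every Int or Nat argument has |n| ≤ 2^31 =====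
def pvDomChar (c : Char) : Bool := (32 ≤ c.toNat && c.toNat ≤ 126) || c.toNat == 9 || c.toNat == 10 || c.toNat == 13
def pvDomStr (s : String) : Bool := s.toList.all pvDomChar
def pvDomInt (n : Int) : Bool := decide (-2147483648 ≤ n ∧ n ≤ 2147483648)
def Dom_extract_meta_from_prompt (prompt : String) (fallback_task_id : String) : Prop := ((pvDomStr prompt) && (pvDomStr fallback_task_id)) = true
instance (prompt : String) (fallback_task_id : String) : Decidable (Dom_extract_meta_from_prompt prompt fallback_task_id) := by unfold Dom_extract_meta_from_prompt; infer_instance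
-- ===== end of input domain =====

-- B replaces A's forward fold over mutable (task_id, scenario_id) state by a per-key
-- back-to-front scan returning the first non-empty match (objective: alternative).

-- ===== PORT A =====
-- inner for-loop body over payload.split(";"); state = (task_id, scenario_id)
def pvAChunk (fold : String × Option String) (chunk : String) : String × Option String :=
  if ¬ PySem.Str.isIn "=" chunk then fold
  else
    match PySem.Str.splitMax? chunk "=" 1 with
    | some (k :: v :: _) =>
        if PySem.Str.strip k = "task_id" ∧ PySem.Str.strip v ≠ "" then (PySem.Str.strip v, fold.2)
        else if PySem.Str.strip k = "scenario_id" ∧ PySem.Str.strip v ≠ "" then (fold.1, some (PySem.Str.strip v))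
        else fold
    | _ => fold

-- outer for-loop with break: the first stripped line starting with "[META]" is processed, then break
def pvALines : List String → String → Option String → String × Option String
  | [], task_id, scenario_id => (task_id, scenario_id)
  | ln :: rest, task_id, scenario_id =>
    let line := PySem.Str.strip ln
    if ¬ PySem.Str.startswith line "[META]" then pvALines rest task_id scenario_id
    else
      let payload := PySem.Str.strip (PySem.Str.slice line (some 6) none)
      ((PySem.Str.split? payload ";").getD []).foldl pvAChunk (task_id, scenario_id)

def extract_meta_from_prompt (prompt : String) (fallback_task_id : String) : List (String × Option String) :=
  let text := prompt
  let r := pvALines (PySem.Str.splitlines text) fallback_task_id none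
  [("task_id", some r.1), ("scenario_id", r.2)]

-- ===== PORT B =====
-- the for-loop with break: payload of the first [META] line, else none
def pvBPayload : List String → Option String
  | [] => none
  | ln :: rest =>
    if PySem.Str.startswith (PySem.Str.strip ln) "[META]" then
      some (PySem.Str.strip (PySem.Str.slice (PySem.Str.strip ln) (some 6) none))
    else pvBPayload rest

-- last_value(key): scan 'reversed(chunks)' (the argument is the reversed list),
-- return the first non-empty stripped value whose stripped key matches
def pvBLast (key : String) : List String → Option String
  | [] => none
  | c :: rest =>
    if PySem.Str.isIn "=" c then
      match PySem.Str.splitMax? c "=" 1 with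
      | some (k :: v :: _) =>
          if PySem.Str.strip k = key then
            if PySem.Str.strip v ≠ "" then some (PySem.Str.strip v) else pvBLast key rest
          else pvBLast key rest
      | _ => pvBLast key rest
    else pvBLast key rest

def extract_meta_from_prompt_alt (prompt : String) (fallback_task_id : String) : List (String × Option String) :=
  let text := prompt
  let chunks := match pvBPayload (PySem.Str.splitlines text) with
    | some payload => (PySem.Str.split? payload ";").getD []
    | none => []
  let tid := pvBLast "task_id" chunks.reverse
  [("task_id", some (match tid with | some v => v | none => fallback_task_id)),
   ("scenario_id", pvBLast "scenario_id" chunks.reverse)]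

-- ===== PRECONDITION & SPEC =====
def Spec_extract_meta_from_prompt (prompt : String) (fallback_task_id : String) (out : List (String × Option String)) : Prop := out = extract_meta_from_prompt_alt prompt fallback_task_id
instance (prompt : String) (fallback_task_id : String) (out : List (String × Option String)) : Decidable (Spec_extract_meta_from_prompt prompt fallback_task_id out) := by unfold Spec_extract_meta_from_prompt; infer_instance

-- ===== CLAIM =====
def Claim_equal_extract_meta_from_prompt : Prop := ∀ (prompt : String) (fallback_task_id : String), Dom_extract_meta_from_prompt prompt fallback_task_id → Spec_extract_meta_from_prompt prompt fallback_task_id (extract_meta_from_prompt prompt fallback_task_id)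

-- ===== LEMMAS AND PROOFS =====

-- A's fold over the chunks equals B's two reverse first-match scans
theorem pvFold_eq (chunks : List String) (fb : String) :
    chunks.foldl pvAChunk (fb, none) =
      ((pvBLast "task_id" chunks.reverse).getD fb, pvBLast "scenario_id" chunks.reverse) := by
  induction chunks using List.reverseRecOn with
  | nil => simp [pvBLast]
  | append_singleton cs c ih =>
      rw [List.foldl_append, List.foldl_cons, List.foldl_nil, ih, List.reverse_append]
      simp only [List.reverse_cons, List.reverse_nil, List.nil_append, List.singleton_append]
      unfold pvAChunk
      simp only [pvBLast]
      by_cases hin : PySem.Chars.isIn ['='] c.toList = true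
      · rcases hsp : PySem.Str.splitMax? c "=" 1 with _ | ⟨_ | ⟨k, _ | ⟨v, rest'⟩⟩⟩
        · simp [hin]
        · simp [hin]
        · simp [hin]
        · by_cases hval : PySem.Str.strip v = ""
          · simp [hin, hval]
          · by_cases hk1 : PySem.Str.strip k = "task_id"
            · simp [hin, hk1, hval]
            · by_cases hk2 : PySem.Str.strip k = "scenario_id"
              · simp [hin, hk2, hval]
              · simp [hin, hk1, hk2, hval]
      · simp [hin]

-- ===== VERDICT =====
theorem extract_meta_from_prompt_spec : Claim_equal_extract_meta_from_prompt := by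
  intro prompt fallback_task_id _
  unfold Spec_extract_meta_from_prompt extract_meta_from_prompt extract_meta_from_prompt_alt
  simp only
  induction PySem.Str.splitlines prompt with
  | nil => simp [pvALines, pvBPayload, pvBLast]
  | cons ln rest ih =>
      by_cases hs : PySem.Chars.startswith (PySem.Chars.strip ln.toList) ['[', 'M', 'E', 'T', 'A', ']'] = true
      · simp only [pvALines, pvBPayload]
        simp [hs, pvFold_eq]
        cases h : pvBLast "task_id" (((PySem.Str.split? (PySem.Str.strip (PySem.Str.slice (PySem.Str.strip ln) (some 6) none)) ";").getD []).reverse) <;> simp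
      · simp only [pvALines, pvBPayload]
        simpa [hs] using ih
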